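-- pv_equiv track=rewrite | github.com/mindspore-lab/mindnlp | mindnlp/dataset/transforms/basic_tokenizer.py | _run_split_on_punc
-- ===== SOURCE A (Python) =====
-- import unicodedata
--
-- def _run_split_on_punc(text):
--     """Splits punctuation on a piece of text."""
--     chars = list(text)
--     i = 0
--     start_new_word = True
--     output = []
--     while i < len(chars):
--         char = chars[i]
--         if _is_punctuation(char):
--             output.append([char])
--             start_new_word = True
--         else:
--             if start_new_word:
--                 output.append([])
--             start_new_word = False
--             output[-1].append(char)
--         i += 1
--
--     return ["".join(x) for x in output]
--
-- def _is_punctuation(char):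
--     """Checks whether `chars` is a punctuation character."""
--     cp = ord(char)
--     # We treat all non-letter/number ASCII as punctuation.
--     # Characters such as "^", "$", and "`" are not in the Unicode
--     # Punctuation class but we treat them as punctuation anyways, for
--     # consistency.
--     if ((33 <= cp <= 47) or
--             (58 <= cp <= 64) or
--             (91 <= cp <= 96) or
--             (123 <= cp <= 126)):
--         return True
--     cat = unicodedata.category(char)
--     if cat.startswith("P"):
--         return True
--     return False
-- ===== SOURCE B (Python) =====
-- import unicodedata
--
-- def _run_split_on_punc(text):
--     """Splits punctuation on a piece of text: scan run by run, emitting each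
--     punctuation char as its own token and each maximal non-punctuation run
--     as one sliced-out token."""
--     tokens = []
--     i, n = 0, len(text)
--     while i < n:
--         if _is_punctuation(text[i]):
--             tokens.append(text[i])
--             i += 1
--         else:
--             j = i + 1
--             while j < n and not _is_punctuation(text[j]):
--                 j += 1
--             tokens.append(text[i:j])
--             i = j
--     return tokens
--
-- def _is_punctuation(char):
--     """Checks whether `chars` is a punctuation character."""
--     cp = ord(char)
--     if ((33 <= cp <= 47) or
--             (58 <= cp <= 64) or
--             (91 <= cp <= 96) or
--             (123 <= cp <= 126)):
--         return True
--     cat = unicodedata.category(char)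
--     if cat.startswith("P"):
--         return True
--     return False
-- ===== Notes on version B (the rewrite author's own statement) =====
-- stated objective: alternative
-- what changed: Replaces A's stateful char-by-char loop (start_new_word flag, building a list of char-lists mutated at output[-1], joined at the end) with a run scanner: each punctuation char is emitted directly and each maximal non-punctuation run is located with an inner scan and sliced out as one token.
import Mathlib
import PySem

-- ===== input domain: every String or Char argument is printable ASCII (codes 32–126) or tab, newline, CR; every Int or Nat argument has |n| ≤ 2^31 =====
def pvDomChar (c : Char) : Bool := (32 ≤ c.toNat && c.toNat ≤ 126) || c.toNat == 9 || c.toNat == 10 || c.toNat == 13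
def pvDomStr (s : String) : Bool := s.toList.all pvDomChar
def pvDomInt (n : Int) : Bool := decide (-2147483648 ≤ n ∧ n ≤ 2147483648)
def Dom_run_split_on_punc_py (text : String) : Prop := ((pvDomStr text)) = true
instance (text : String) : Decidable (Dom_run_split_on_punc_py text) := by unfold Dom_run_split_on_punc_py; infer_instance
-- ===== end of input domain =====

-- B replaces A's stateful flag-driven loop by a run scanner (emit punctuation chars,
-- slice out maximal non-punctuation runs); same return value, alternative structure.

-- ===== PORT A =====
-- _is_punctuation, shared helper of both modules. Exact on Dom (printable ASCII +
-- tab/newline/CR): every ASCII char of Unicode category P* lies inside the four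
-- ranges, so the unicodedata.category branch never changes the answer on Dom.
def isPunct (c : Char) : Bool :=
  let cp := c.toNat
  (33 ≤ cp && cp ≤ 47) || (58 ≤ cp && cp ≤ 64) || (91 ≤ cp && cp ≤ 96) || (123 ≤ cp && cp ≤ 126)

-- output[-1].append(char): append c to the last inner list (Python raises on [],
-- which is unreachable from the initial state true/[]).
def appendLast : List (List Char) → Char → List (List Char)
  | [], _ => []
  | [x], c => [x ++ [c]]
  | x :: xs, c => x :: appendLast xs c

-- the while loop of A: state = (remaining chars, start_new_word, output)
def aLoop : List Char → Bool → List (List Char) → List (List Char)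
  | [], _, output => output
  | c :: rest, start_new_word, output =>
    if isPunct c then aLoop rest true (output ++ [[c]])
    else aLoop rest false (appendLast (if start_new_word then output ++ [[]] else output) c)

def run_split_on_punc_py (text : String) : List String :=
  (aLoop text.toList true []).map (fun x => String.ofList x)

-- ===== PORT B =====
-- run scanner: a punctuation char is its own token; otherwise take the maximal
-- non-punctuation run (the inner while scanning j, then the slice text[i:j])
def bGo : List Char → List String
  | [] => []
  | c :: rest =>
    if isPunct c then String.ofList [c] :: bGo rest
    else
      String.ofList (c :: rest.takeWhile (fun x => !isPunct x)) ::
        bGo (rest.dropWhile (fun x => !isPunct x))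
termination_by cs => cs.length
decreasing_by
  · simp
  · have := List.length_dropWhile_le (fun x => !isPunct x) rest
    simp; omega

def run_split_on_punc_py_alt (text : String) : List String := bGo text.toList

-- ===== PRECONDITION & SPEC =====
def Spec_run_split_on_punc_py (text : String) (out : List String) : Prop := out = run_split_on_punc_py_alt text
instance (text : String) (out : List String) : Decidable (Spec_run_split_on_punc_py text out) := by unfold Spec_run_split_on_punc_py; infer_instance

-- ===== CLAIM (what is proved, stated in full; the proofs are below) =====
def Claim_equal_run_split_on_punc_py : Prop := ∀ (text : String), Dom_run_split_on_punc_py text → Spec_run_split_on_punc_py text (run_split_on_punc_py text)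

-- ===== LEMMAS AND PROOFS =====

theorem appendLast_ne_nil (l : List (List Char)) (c : Char) (h : l ≠ []) :
    appendLast l c ≠ [] := by
  match l with
  | [] => exact absurd rfl h
  | [x] => simp [appendLast]
  | x :: y :: xs => simp [appendLast]

theorem appendLast_append (pre acc : List (List Char)) (c : Char) (h : acc ≠ []) :
    appendLast (pre ++ acc) c = pre ++ appendLast acc c := by
  induction pre with
  | nil => simp
  | cons p pre ih =>
    have hne : pre ++ acc ≠ [] := by
      intro hn
      rcases List.append_eq_nil_iff.mp hn with ⟨_, h2⟩
      exact h h2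
    match hpa : pre ++ acc, hne with
    | q :: rest, _ =>
      simp only [List.cons_append, hpa, appendLast]
      rw [← hpa, ih]

theorem aLoop_shift (cs : List Char) (pre acc : List (List Char)) (b : Bool)
    (h : acc ≠ [] ∨ b = true) : aLoop cs b (pre ++ acc) = pre ++ aLoop cs b acc := by
  induction cs generalizing pre acc b with
  | nil => simp [aLoop]
  | cons c rest ih =>
    by_cases hp : isPunct c
    · simp only [aLoop, hp, if_pos]
      rw [List.append_assoc, ih _ (acc ++ [[c]]) true (Or.inr rfl)]
    · simp only [aLoop, hp, Bool.false_eq_true, if_false]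
      cases b with
      | true =>
        simp only [if_pos]
        rw [List.append_assoc pre acc [[]],
          appendLast_append pre (acc ++ [[]]) c (by simp),
          ih _ _ false (Or.inl (appendLast_ne_nil _ _ (by simp)))]
      | false =>
        have hacc : acc ≠ [] := h.resolve_right (by simp)
        simp only [if_neg, Bool.false_eq_true, not_false_iff]
        rw [appendLast_append pre acc c hacc,
          ih _ _ false (Or.inl (appendLast_ne_nil _ _ hacc))]

theorem aLoop_true (cs : List Char) (out : List (List Char)) :
    aLoop cs true out = out ++ aLoop cs true [] := by
  have := aLoop_shift cs out [] true (Or.inr rfl)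
  simpa using this

theorem aLoop_bGo (cs : List Char) :
    ((aLoop cs true []).map (fun x => String.ofList x) = bGo cs) ∧
    (∀ w : List Char, (aLoop cs false [w]).map (fun x => String.ofList x) =
      String.ofList (w ++ cs.takeWhile (fun x => !isPunct x)) ::
        bGo (cs.dropWhile (fun x => !isPunct x))) := by
  induction cs with
  | nil => simp [aLoop, bGo]
  | cons c rest ih =>
    by_cases hp : isPunct c
    · constructor
      · simp only [aLoop, hp, if_pos, List.nil_append, bGo]
        rw [aLoop_true rest [[c]]]
        simp [ih.1]
      · intro w
        simp only [aLoop, hp, if_pos]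
        rw [show ([w] ++ [[c]] : List (List Char)) = [w, [c]] by rfl,
          aLoop_true rest [w, [c]]]
        simp [ih.1, bGo, hp, List.takeWhile, List.dropWhile]
    · constructor
      · simp only [aLoop, hp, if_neg, Bool.false_eq_true, not_false_iff, if_pos,
          List.nil_append]
        show ((aLoop rest false [[c]]).map (fun x => String.ofList x)) = _
        rw [ih.2 [c]]
        simp [bGo, hp]
      · intro w
        simp only [aLoop, hp, if_neg, Bool.false_eq_true, not_false_iff]
        show ((aLoop rest false [w ++ [c]]).map (fun x => String.ofList x)) = _
        rw [ih.2 (w ++ [c])]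
        simp [List.takeWhile, List.dropWhile, hp]

-- ===== VERDICT (by name: the statement is the Claim_ definition above) =====
theorem run_split_on_punc_py_spec : Claim_equal_run_split_on_punc_py := by
  intro text _
  unfold Spec_run_split_on_punc_py run_split_on_punc_py run_split_on_punc_py_alt
  exact (aLoop_bGo text.toList).1
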